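-- pv_equiv track=rewrite | github.com/Ookamiko/AdventOfCode | year_2023/day/day05.py | create_map_road
-- ===== SOURCE A (Python) =====
-- def create_map_road(lines):
-- 	result = []
-- 	current_map = []
--
-- 	for line in lines:
-- 		if line == '':
-- 			current_map = sorted(current_map, key=lambda x: x['ss'])
-- 			result.append(current_map)
-- 			current_map = []
-- 		elif line[0].isnumeric():
-- 			tmp = line.split(' ')
-- 			current_map.append({'sd': int(tmp[0]), 'ss': int(tmp[1]), 'es': int(tmp[1]) + int(tmp[2]) - 1})
--
-- 	current_map = sorted(current_map, key=lambda x: x['ss'])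
-- 	result.append(current_map)
--
-- 	return result
-- ===== SOURCE B (Python) =====
-- def create_map_road(lines):
-- 	# Locate the blank-line separators by index, slice the input into segments
-- 	# between them, and build each group already sorted by inserting every
-- 	# parsed record at its position (no call to sorted()).
-- 	cuts = [i for i, line in enumerate(lines) if line == '']
-- 	starts = [0] + [c + 1 for c in cuts]
-- 	ends = cuts + [len(lines)]
--
-- 	def build(seg):
-- 		group = []
-- 		for line in seg:
-- 			if line[0].isnumeric():
-- 				tmp = line.split(' ')
-- 				sd, ss, n = int(tmp[0]), int(tmp[1]), int(tmp[2])
-- 				rec = {'sd': sd, 'ss': ss, 'es': ss + n - 1}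
-- 				i = 0
-- 				while i < len(group) and group[i]['ss'] <= ss:
-- 					i += 1
-- 				group.insert(i, rec)
-- 		return group
--
-- 	return [build(lines[s:e]) for s, e in zip(starts, ends)]
-- ===== Notes on version B (the rewrite author's own statement) =====
-- stated objective: alternative
-- what changed: Replaces A's single stateful pass that flushes and sorts a running group at every blank line with an index-based design: compute the positions of the blank separators, slice the input into segments between them, and build each group already in order by inserting every parsed record at its sorted position (no call to sorted()).
import Mathlib
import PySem

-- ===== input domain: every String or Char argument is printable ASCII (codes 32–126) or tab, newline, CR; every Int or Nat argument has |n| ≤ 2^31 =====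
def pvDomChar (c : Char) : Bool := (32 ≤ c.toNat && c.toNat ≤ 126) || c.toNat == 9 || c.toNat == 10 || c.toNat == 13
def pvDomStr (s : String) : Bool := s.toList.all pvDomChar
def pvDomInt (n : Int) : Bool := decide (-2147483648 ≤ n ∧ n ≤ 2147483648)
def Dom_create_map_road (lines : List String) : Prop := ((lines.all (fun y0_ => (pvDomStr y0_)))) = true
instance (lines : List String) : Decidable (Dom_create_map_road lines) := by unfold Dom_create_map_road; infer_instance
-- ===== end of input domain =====

-- B groups by separator indices + slicing and keeps each group ordered by insertion
-- (no sorted() call) instead of A's flush-and-sort stateful pass; alternative decomposition, same cost.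


-- ===== PORT A =====
-- line[0].isnumeric(): on the ASCII domain isnumeric coincides with isdigit
def pvIsNum (line : String) : Bool := ((PySem.Str.pyGet? line 0).map PySem.Chars.isdigit).getD false

-- key=lambda x: x['ss'] (the key is always present in the dicts built here)
def pvKeySS (d : List (String × Int)) : Int := PySem.Dict.getD ⟨d⟩ "ss" 0

-- the dict literal {'sd': …, 'ss': …, 'es': …} built from a numeric line (both Pythons build it
-- the same way); int(tmp[k]) is total here via getD 0 — Pre_ excludes the raising lines
def pvParse (line : String) : List (String × Int) :=
  let tmp := (PySem.Str.split? line " ").getD []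
  let sd := (PySem.Int.ofStr? (PySem.List.pyGetD tmp 0 "")).getD 0
  let ss := (PySem.Int.ofStr? (PySem.List.pyGetD tmp 1 "")).getD 0
  let n := (PySem.Int.ofStr? (PySem.List.pyGetD tmp 2 "")).getD 0
  [("sd", sd), ("ss", ss), ("es", ss + n - 1)]

-- the loop body of A
def pvStepA (st : List (List (List (String × Int))) × List (List (String × Int))) (line : String) :
    List (List (List (String × Int))) × List (List (String × Int)) :=
  if line = "" then
    (st.1 ++ [PySem.List.sorted st.2 (key := pvKeySS)], [])
  else if pvIsNum line then
    (st.1, st.2 ++ [pvParse line])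
  else st

def create_map_road (lines : List String) : List (List (List (String × Int))) :=
  let st := lines.foldl pvStepA ([], [])
  st.1 ++ [PySem.List.sorted st.2 (key := pvKeySS)]

-- ===== PORT B =====
-- the while-loop-and-insert of B: insert rec before the first record whose 'ss' exceeds rec's
def pvInsert (group : List (List (String × Int))) (rec : List (String × Int)) :
    List (List (String × Int)) :=
  match group with
  | [] => [rec]
  | y :: t => if pvKeySS rec < pvKeySS y then rec :: y :: t else y :: pvInsert t rec

-- build(seg) of B: fold over the segment, inserting each parsed numeric line at its sorted position
def pvBuild (seg : List String) : List (List (String × Int)) :=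
  seg.foldl (fun group line => if pvIsNum line then pvInsert group (pvParse line) else group) []

def create_map_road_alt (lines : List String) : List (List (List (String × Int))) :=
  let cuts := (PySem.List.enumerate lines).filterMap
    (fun p => if p.2 = "" then some p.1 else none)
  let starts := 0 :: cuts.map (· + 1)
  let ends := cuts ++ [(lines.length : Int)]
  (starts.zip ends).map (fun p => pvBuild (PySem.List.slice lines (some p.1) (some p.2)))

-- ===== PRECONDITION & SPEC =====
-- Pre_ excludes exactly the inputs on which Python A raises: a line starting with a digit
-- whose space-split has fewer than 3 tokens (IndexError) or whose first three tokens are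
-- not all int()-parseable (ValueError). A returns on every input admitted here.
def pvLineOK (line : String) : Bool :=
  !(pvIsNum line) ||
    (let tmp := (PySem.Str.split? line " ").getD []
     decide (3 ≤ tmp.length)
       && (PySem.Int.ofStr? (tmp.getD 0 "")).isSome
       && (PySem.Int.ofStr? (tmp.getD 1 "")).isSome
       && (PySem.Int.ofStr? (tmp.getD 2 "")).isSome)

def Pre_create_map_road (lines : List String) : Prop := lines.all pvLineOK = true
instance (lines : List String) : Decidable (Pre_create_map_road lines) := by unfold Pre_create_map_road; infer_instance

def pvWitness_create_map_road : List String := ["50 98 2", "52 50 48", "", "0 15 37", "seeds:", ""]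

def Spec_create_map_road (lines : List String) (out : List (List (List (String × Int)))) : Prop := out = create_map_road_alt lines
instance (lines : List String) (out : List (List (List (String × Int)))) : Decidable (Spec_create_map_road lines out) := by unfold Spec_create_map_road; infer_instance

-- ===== CLAIM (what is proved, stated in full; the proofs are below) =====
def Claim_equal_create_map_road : Prop := ∀ (lines : List String), Dom_create_map_road lines → Pre_create_map_road lines → Spec_create_map_road lines (create_map_road lines)

-- ===== LEMMAS AND PROOFS =====

-- proof-side abstraction: the segments between blank lines, as a structural recursion
def pvGsplit : List String → List (List String)
  | [] => [[]]
  | h :: t =>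
    if h = "" then [] :: pvGsplit t
    else match pvGsplit t with
      | [] => [[h]]
      | g :: gs => (h :: g) :: gs

-- what one segment becomes: Python's stable sort of its parsed numeric lines
def pvG (g : List String) : List (List (String × Int)) :=
  PySem.List.sorted ((g.filter pvIsNum).map pvParse) (key := pvKeySS)

theorem pvGsplit_ne_nil (ls : List String) : pvGsplit ls ≠ [] := by
  cases ls with
  | nil => simp [pvGsplit]
  | cons h t =>
    simp only [pvGsplit]
    split
    · simp
    · cases pvGsplit t <;> simp

-- prepend pending lines onto the first segment
def pvConsFirst (last : List String) : List (List String) → List (List String)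
  | [] => [last]
  | g :: gs => (last ++ g) :: gs

-- ===== the A side: the flush loop is pvG mapped over the segments =====
theorem pvLoopA_eq (ls : List String) :
    ∀ (acc : List (List (List (String × Int)))) (last : List String),
      (let st := ls.foldl pvStepA (acc, (last.filter pvIsNum).map pvParse)
       st.1 ++ [PySem.List.sorted st.2 (key := pvKeySS)]) =
      acc ++ (pvConsFirst last (pvGsplit ls)).map pvG := by
  induction ls with
  | nil =>
    intro acc last
    simp [pvGsplit, pvConsFirst, pvG]
  | cons line ls ih =>
    intro acc last
    simp only [List.foldl_cons]
    by_cases hb : line = ""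
    · have h2 := ih (acc ++ [pvG last]) []
      simp only [List.filter_nil, List.map_nil] at h2
      simp only [pvStepA, hb, if_true]
      rw [show PySem.List.sorted ((last.filter pvIsNum).map pvParse) (key := pvKeySS) = pvG last from rfl]
      rw [h2]
      simp only [pvGsplit, if_true]
      cases hg : pvGsplit ls with
      | nil => exact absurd hg (pvGsplit_ne_nil ls)
      | cons g gs => simp [pvConsFirst]
    · by_cases hn : pvIsNum line
      · have h2 := ih acc (last ++ [line])
        simp only [pvStepA, hb, if_false, hn, if_true]
        rw [show ((last.filter pvIsNum).map pvParse ++ [pvParse line]) = (((last ++ [line]).filter pvIsNum).map pvParse) by simp [List.filter_append, hn]]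
        rw [h2]
        simp only [pvGsplit, hb, if_false]
        cases hg : pvGsplit ls with
        | nil => exact absurd hg (pvGsplit_ne_nil ls)
        | cons g gs => simp [pvConsFirst]
      · have h2 := ih acc (last ++ [line])
        simp only [pvStepA, hb, if_false, hn, Bool.false_eq_true]
        rw [show ((last.filter pvIsNum).map pvParse) = (((last ++ [line]).filter pvIsNum).map pvParse) by simp [List.filter_append, hn]]
        rw [h2]
        simp only [pvGsplit, hb, if_false]
        cases hg : pvGsplit ls with
        | nil => exact absurd hg (pvGsplit_ne_nil ls)
        | cons g gs => simp [pvConsFirst]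

-- ===== the B side, step 1: B's insertion loop is PySem's insertBy =====
theorem pvInsert_eq_insertBy (rec : List (String × Int)) (group : List (List (String × Int))) :
    pvInsert group rec =
      PySem.List.insertBy (fun a b => decide (pvKeySS a < pvKeySS b)) rec group := by
  induction group with
  | nil => rfl
  | cons y t ih => simp [pvInsert, PySem.List.insertBy, ih]

-- step 2: folding conditional insertion over a segment IS the stable sort of its parsed numeric lines
theorem pvBuild_eq_pvG (seg : List String) : pvBuild seg = pvG seg := by
  rw [pvG, PySem.List.sorted_eq_foldl_insertBy]
  rw [pvBuild]
  generalize ([] : List (List (String × Int))) = init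
  induction seg generalizing init with
  | nil => rfl
  | cons line t ih =>
    by_cases hn : pvIsNum line
    · simp only [List.foldl_cons, hn, if_true, List.filter_cons, List.map_cons]
      rw [pvInsert_eq_insertBy]
      exact ih _
    · simp only [List.foldl_cons, hn, Bool.false_eq_true, if_false, List.filter_cons]
      exact ih _

-- step 3: the cut indices as a Nat-valued structural recursion
def pvCutsNat : List String → List Nat
  | [] => []
  | h :: t => if h = "" then 0 :: (pvCutsNat t).map (· + 1) else (pvCutsNat t).map (· + 1)

theorem pvCuts_eq (t : List String) : ∀ (s : Int),
    (PySem.List.enumerate t s).filterMap (fun p => if p.2 = "" then some p.1 else none) =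
      (pvCutsNat t).map (fun n : Nat => (n : Int) + s) := by
  induction t with
  | nil => intro s; simp [PySem.List.enumerate_nil, pvCutsNat]
  | cons h t ih =>
    intro s
    rw [PySem.List.enumerate_cons]
    by_cases hb : h = ""
    · simp only [List.filterMap_cons, hb, if_true, pvCutsNat, ih (s + 1), List.map_cons,
        List.map_map]
      congr 1
      · push_cast; ring
      · apply List.map_congr_left; intro n _; simp only [Function.comp_apply]; push_cast; ring
    · simp only [List.filterMap_cons, hb, if_false, pvCutsNat, ih (s + 1), List.map_map]
      apply List.map_congr_left; intro n _; simp only [Function.comp_apply]; push_cast; ring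

-- step 4: the Nat-level picture of B's slicing equals the segments
def pvSegs (lines : List String) : List (List String) :=
  ((0 :: (pvCutsNat lines).map (· + 1)).zip (pvCutsNat lines ++ [lines.length])).map
    (fun p => (lines.drop p.1).take (p.2 - p.1))

theorem pvSegsShift (as bs : List Nat) (h : String) (t : List String) :
    (((as.map (· + 1)).zip (bs.map (· + 1))).map
        (fun p => ((h :: t).drop p.1).take (p.2 - p.1))) =
      (as.zip bs).map (fun p => (t.drop p.1).take (p.2 - p.1)) := by
  rw [List.zip_map, List.map_map]
  apply List.map_congr_left
  intro p _
  simp [Prod.map]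

theorem pvSegs_eq_gsplit (lines : List String) : pvSegs lines = pvGsplit lines := by
  induction lines with
  | nil => rfl
  | cons h t ih =>
    by_cases hb : h = ""
    · subst hb
      rw [show pvGsplit ("" :: t) = [] :: pvGsplit t by simp [pvGsplit]]
      rw [pvSegs]
      rw [show pvCutsNat ("" :: t) = 0 :: (pvCutsNat t).map (· + 1) by simp [pvCutsNat]]
      rw [show (0 :: (pvCutsNat t).map (· + 1)) ++ [("" :: t).length] =
            0 :: (pvCutsNat t ++ [t.length]).map (· + 1) by simp]
      rw [List.zip_cons_cons, List.map_cons]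
      congr 1
      rw [pvSegsShift]
      rw [← ih, pvSegs]
    · cases hc : pvCutsNat t with
      | nil =>
        have h1 : pvSegs t = [t] := by simp [pvSegs, hc]
        simp only [pvGsplit, hb, if_false]
        rw [← ih, h1]
        simp [pvSegs, hc, pvCutsNat, hb, List.take_succ_cons]
      | cons c cs =>
        have h1 : pvSegs t = (t.take c) ::
            (((c + 1) :: cs.map (· + 1)).zip (cs ++ [t.length])).map
              (fun p => (t.drop p.1).take (p.2 - p.1)) := by
          simp [pvSegs, hc, List.zip_cons_cons]
        simp only [pvGsplit, hb, if_false]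
        rw [← ih, h1]
        rw [pvSegs]
        rw [show pvCutsNat (h :: t) = ((c + 1) :: cs.map (· + 1)) by simp [pvCutsNat, hb, hc]]
        rw [show ((c + 1) :: cs.map (· + 1)) ++ [(h :: t).length] =
              (c + 1) :: ((cs ++ [t.length]).map (· + 1)) by simp]
        rw [show (0 : Nat) :: ((c + 1) :: cs.map (· + 1)).map (· + 1) =
              0 :: (((c + 1) :: cs.map (· + 1)).map (· + 1)) from rfl]
        rw [List.zip_cons_cons, List.map_cons]
        congr 1
        exact pvSegsShift _ _ h t

-- step 5: B's Int-valued slicing reduces to the Nat picture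
theorem pvAlt_eq_map_pvG (lines : List String) :
    create_map_road_alt lines = (pvGsplit lines).map pvG := by
  simp only [create_map_road_alt]
  rw [pvCuts_eq lines 0]
  rw [show (pvCutsNat lines).map (fun n : Nat => (n : Int) + 0) =
        (pvCutsNat lines).map (fun n : Nat => (n : Int)) from by
      apply List.map_congr_left; intro n _; ring]
  rw [show (0 : Int) :: ((pvCutsNat lines).map (fun n : Nat => (n : Int))).map (· + 1) =
        (0 :: (pvCutsNat lines).map (· + 1)).map (fun n : Nat => (n : Int)) from by
      simp only [List.map_cons, List.map_map, Nat.cast_zero]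
      congr 1]
  rw [show ((pvCutsNat lines).map (fun n : Nat => (n : Int))) ++ [(lines.length : Int)] =
        (pvCutsNat lines ++ [lines.length]).map (fun n : Nat => (n : Int)) from by simp]
  rw [List.zip_map, List.map_map]
  rw [← pvSegs_eq_gsplit, pvSegs, List.map_map]
  apply List.map_congr_left
  intro p _
  simp only [Function.comp_apply, Prod.map_fst, Prod.map_snd]
  rw [PySem.List.slice_natCast, pvBuild_eq_pvG, pvG]

-- ===== VERDICT (by name: the statement is the Claim_ definition above) =====
theorem create_map_road_spec : Claim_equal_create_map_road := by
  intro lines _ _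
  unfold Spec_create_map_road create_map_road
  have hA := pvLoopA_eq lines [] []
  simp only [List.filter_nil, List.map_nil] at hA
  rw [hA, pvAlt_eq_map_pvG]
  cases hg : pvGsplit lines with
  | nil => exact absurd hg (pvGsplit_ne_nil lines)
  | cons g gs => simp [pvConsFirst]
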